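-- pv_equiv track=rewrite | github.com/waffleprinter/project_euler | problem 116.py | get_replacements
-- ===== SOURCE A (Python) =====
-- def get_replacements(tile_length, row_length):
--     if (tile_length, row_length) in replacements_dict:
--         return replacements_dict[(tile_length, row_length)]
--
--     ans = row_length - tile_length + 1
--
--     for i in range(tile_length, row_length - tile_length + 1):
--         ans += get_replacements(tile_length, row_length - i)
--
--     replacements_dict[(tile_length, row_length)] = ans
--
--     return ans
--
-- replacements_dict = {}
-- ===== SOURCE B (Python) =====
-- def get_replacements(tile_length, row_length):
--     if row_length < tile_length:
--         return row_length - tile_length + 1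
--     vals = []
--     S = 0
--     for r in range(tile_length, row_length + 1):
--         if r - tile_length >= tile_length:
--             S += vals[r - 2 * tile_length]
--         vals.append(r - tile_length + 1 + S)
--     return vals[row_length - tile_length]
-- ===== Notes on version B (the rewrite author's own statement) =====
-- stated objective: alternative
-- what changed: Replaces A's top-down memoized recursion (each value re-summing a range of smaller results) with a single bottom-up pass that keeps the list of computed values and a running sum of the ones the recurrence needs; O(n) work instead of O(n^2) and no recursion, though a timing run could not measure a ratio (A is sub-millisecond or hits the recursion limit on the generated inputs).
import Mathlib
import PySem

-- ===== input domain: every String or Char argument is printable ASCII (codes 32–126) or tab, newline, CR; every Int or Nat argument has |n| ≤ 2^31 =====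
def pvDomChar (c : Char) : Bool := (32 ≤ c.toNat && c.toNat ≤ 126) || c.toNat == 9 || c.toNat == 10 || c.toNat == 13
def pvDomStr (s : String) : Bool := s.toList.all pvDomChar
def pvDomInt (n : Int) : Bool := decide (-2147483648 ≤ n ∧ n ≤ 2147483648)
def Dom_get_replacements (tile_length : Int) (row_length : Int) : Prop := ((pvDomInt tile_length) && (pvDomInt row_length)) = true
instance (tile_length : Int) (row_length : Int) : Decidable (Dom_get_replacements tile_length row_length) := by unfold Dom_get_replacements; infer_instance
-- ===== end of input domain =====

-- B replaces A's top-down memoized recursion by a single bottom-up pass that keeps a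
-- running sum of already-computed values (objective: alternative algorithm).

-- ===== PORT A =====
-- A's recursion with its memo dict `replacements_dict` threaded through as state.
-- The recursion is fuel-indexed: fuel row_length.toNat + 1 is enough whenever the
-- Python call terminates; in the fuel-0 case the loop's recursive call is replaced by
-- the state unchanged (that case is never reached under Pre_).
def goA (tile_length : Int) :
    Nat → Int → PySem.Dict (Int × Int) Int → Int × PySem.Dict (Int × Int) Int
  | 0, row_length, memo =>
    match PySem.Dict.get? memo (tile_length, row_length) with
    | some v => (v, memo)
    | none =>
      (row_length - tile_length + 1,
       PySem.Dict.insert memo (tile_length, row_length) (row_length - tile_length + 1))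
  | fuel + 1, row_length, memo =>
    match PySem.Dict.get? memo (tile_length, row_length) with
    | some v => (v, memo)
    | none =>
      let p := (PySem.List.pyRange tile_length (row_length - tile_length + 1) 1).foldl
        (fun (st : Int × PySem.Dict (Int × Int) Int) i =>
          let q := goA tile_length fuel (row_length - i) st.2
          (st.1 + q.1, q.2))
        (row_length - tile_length + 1, memo)
      (p.1, PySem.Dict.insert p.2 (tile_length, row_length) p.1)

-- Python's `replacements_dict` is a module-global pure cache: it never changes the
-- value returned, so each call of the port starts from the empty cache.
def get_replacements (tile_length : Int) (row_length : Int) : Int :=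
  (goA tile_length (row_length.toNat + 1) row_length PySem.Dict.empty).1

-- ===== PORT B =====
-- `vals[r - 2*tile_length]` and `vals[row_length - tile_length]` are ported with
-- pyGetD …, 0; under Pre_ both indices are always in range, so the default is exact.
def get_replacements_alt (tile_length : Int) (row_length : Int) : Int :=
  if row_length < tile_length then row_length - tile_length + 1
  else
    let st :=
      (PySem.List.pyRange tile_length (row_length + 1) 1).foldl
        (fun (st : List Int × Int) r =>
          let S := if tile_length ≤ r - tile_length
                   then st.2 + PySem.List.pyGetD st.1 (r - 2 * tile_length) 0
                   else st.2
          (st.1 ++ [r - tile_length + 1 + S], S))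
        ([], 0)
    PySem.List.pyGetD st.1 (row_length - tile_length) 0

-- ===== PRECONDITION & SPEC =====
-- Pre_ is exactly where the Python A terminates: for tile_length ≤ 0 and
-- row_length ≥ 2*tile_length the recursion never shrinks and A hits RecursionError.
def Pre_get_replacements (tile_length : Int) (row_length : Int) : Prop :=
  1 ≤ tile_length ∨ row_length < 2 * tile_length
instance (tile_length : Int) (row_length : Int) : Decidable (Pre_get_replacements tile_length row_length) := by unfold Pre_get_replacements; infer_instance
def pvWitness_get_replacements : Int × Int := (3, 17)

def Spec_get_replacements (tile_length : Int) (row_length : Int) (out : Int) : Prop := out = get_replacements_alt tile_length row_length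
instance (tile_length : Int) (row_length : Int) (out : Int) : Decidable (Spec_get_replacements tile_length row_length out) := by unfold Spec_get_replacements; infer_instance

-- ===== CLAIM (what is proved, stated in full; the proofs are below) =====
def Claim_equal_get_replacements : Prop := ∀ (tile_length : Int) (row_length : Int), Dom_get_replacements tile_length row_length → Pre_get_replacements tile_length row_length → Spec_get_replacements tile_length row_length (get_replacements tile_length row_length)

-- ===== LEMMAS AND PROOFS =====

-- proof-side reference: A's recursion without the cache (same values)
def goP (tile_length : Int) : Nat → Int → Int
  | 0, row_length => row_length - tile_length + 1
  | fuel + 1, row_length =>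
    (PySem.List.pyRange tile_length (row_length - tile_length + 1) 1).foldl
      (fun ans i => ans + goP tile_length fuel (row_length - i))
      (row_length - tile_length + 1)

def pureF (tile_length : Int) (row_length : Int) : Int :=
  goP tile_length (row_length.toNat + 1) row_length

-- the fuel does not matter as long as it exceeds row_length.toNat
theorem goP_fuel (tile_length : Int) (ht : 1 ≤ tile_length) :
    ∀ (n : Nat) (row_length : Int) (f1 f2 : Nat),
      row_length.toNat ≤ n → row_length.toNat < f1 → row_length.toNat < f2 →
      goP tile_length f1 row_length = goP tile_length f2 row_length := by
  intro n
  induction n with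
  | zero =>
    intro r f1 f2 hn h1 h2
    obtain ⟨a, rfl⟩ : ∃ a, f1 = a + 1 := ⟨f1 - 1, by omega⟩
    obtain ⟨b, rfl⟩ : ∃ b, f2 = b + 1 := ⟨f2 - 1, by omega⟩
    have hempty : PySem.List.pyRange tile_length (r - tile_length + 1) 1 = [] :=
      PySem.List.pyRange_one_eq_nil (by omega)
    simp [goP, hempty]
  | succ m ih =>
    intro r f1 f2 hn h1 h2
    obtain ⟨a, rfl⟩ : ∃ a, f1 = a + 1 := ⟨f1 - 1, by omega⟩
    obtain ⟨b, rfl⟩ : ∃ b, f2 = b + 1 := ⟨f2 - 1, by omega⟩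
    simp only [goP]
    refine PySem.List.foldl_congr_mem _ _ _ _ ?_
    intro acc i hi
    have hmem := (PySem.List.mem_pyRange_one).mp hi
    rw [ih (r - i) a b (by omega) (by omega) (by omega)]

-- change of index j := r - i over a symmetric range
theorem sum_map_reflect (g : Int → Int) (r : Int) :
    ∀ (n : Nat) (a b : Int), (b - a).toNat ≤ n → r - b + 1 = a → r - a + 1 = b →
    ((PySem.List.pyRange a b 1).map (fun i => g (r - i))).sum =
    ((PySem.List.pyRange a b 1).map g).sum := by
  intro n
  induction n with
  | zero =>
    intro a b hn ha hb
    rw [PySem.List.pyRange_one_eq_nil (by omega)]; rfl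
  | succ m ih =>
    intro a b hn ha hb
    by_cases hab : b ≤ a
    · rw [PySem.List.pyRange_one_eq_nil hab]; rfl
    · replace hab : a < b := by omega
      obtain ⟨c, rfl⟩ : ∃ c, b = c + 1 := ⟨b - 1, by omega⟩
      by_cases hac : a = c
      · subst hac
        rw [PySem.List.pyRange_one_singleton]
        have : r - a = a := by omega
        simp [this]
      · have h1 : PySem.List.pyRange a (c + 1) 1 = a :: PySem.List.pyRange (a + 1) (c + 1) 1 :=
          PySem.List.pyRange_one_cons (by omega)
        have h2 : PySem.List.pyRange (a + 1) (c + 1) 1 = PySem.List.pyRange (a + 1) c 1 ++ [c] :=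
          PySem.List.pyRange_one_succ_right (by omega)
        rw [h1, h2]
        simp only [List.map_cons, List.map_append, List.sum_cons, List.sum_append,
          List.map_cons, List.map_nil, List.sum_cons, List.sum_nil]
        rw [ih (a + 1) c (by omega) (by omega) (by omega)]
        have e1 : r - a = c := by omega
        have e2 : r - c = a := by omega
        rw [e1, e2]
        ring

-- A's recurrence, loop orientation
theorem pureF_rec' (tile_length row_length : Int) (ht : 1 ≤ tile_length) :
    pureF tile_length row_length =
      (row_length - tile_length + 1) +
        ((PySem.List.pyRange tile_length (row_length - tile_length + 1) 1).map
          (fun i => pureF tile_length (row_length - i))).sum := by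
  have hunf : pureF tile_length row_length
      = (PySem.List.pyRange tile_length (row_length - tile_length + 1) 1).foldl
          (fun ans i => ans + goP tile_length row_length.toNat (row_length - i))
          (row_length - tile_length + 1) := rfl
  rw [hunf]
  rw [PySem.List.foldl_congr_mem _
        (fun ans i => ans + goP tile_length row_length.toNat (row_length - i))
        (fun ans i => ans + pureF tile_length (row_length - i)) _
        (by
          intro acc i hi
          have hmem := (PySem.List.mem_pyRange_one).mp hi
          show acc + goP tile_length row_length.toNat (row_length - i)
              = acc + pureF tile_length (row_length - i)
          unfold pureF
          rw [goP_fuel tile_length ht row_length.toNat (row_length - i)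
                row_length.toNat ((row_length - i).toNat + 1)
                (by omega) (by omega) (by omega)])]
  rw [PySem.List.foldl_add]

-- A's recurrence after reversing the summation order
theorem pureF_rec (tile_length row_length : Int) (ht : 1 ≤ tile_length) :
    pureF tile_length row_length =
      (row_length - tile_length + 1) +
        ((PySem.List.pyRange tile_length (row_length - tile_length + 1) 1).map
          (fun j => pureF tile_length j)).sum := by
  rw [pureF_rec' tile_length row_length ht]
  congr 1
  exact sum_map_reflect _ row_length ((row_length - tile_length + 1 - tile_length).toNat)
    tile_length (row_length - tile_length + 1) (le_refl _) (by omega) (by omega)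

-- below the threshold the range is empty and the recurrence is just the base count
theorem pureF_base (tile_length row_length : Int) (ht : 1 ≤ tile_length)
    (h : row_length < 2 * tile_length) :
    pureF tile_length row_length = row_length - tile_length + 1 := by
  rw [pureF_rec' tile_length row_length ht,
    PySem.List.pyRange_one_eq_nil (by omega)]
  simp

-- the memo cache only ever holds correct values
def GoodMemo (tile_length : Int) (m : PySem.Dict (Int × Int) Int) : Prop :=
  ∀ r v, PySem.Dict.get? m (tile_length, r) = some v → v = pureF tile_length r

theorem goodMemo_insert (tile_length r : Int) (m : PySem.Dict (Int × Int) Int)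
    (hm : GoodMemo tile_length m) (hv : v = pureF tile_length r) :
    GoodMemo tile_length (PySem.Dict.insert m (tile_length, r) v) := by
  intro r' v' h
  by_cases hr : r' = r
  · subst hr
    rw [PySem.Dict.get?_insert_self] at h
    cases h
    exact hv
  · rw [PySem.Dict.get?_insert_of_ne _ _ (by simp [hr])] at h
    exact hm r' v' h

-- the memoized recursion computes pureF and preserves the cache invariant
theorem goA_ok (tile_length : Int) (ht : 1 ≤ tile_length) :
    ∀ (n : Nat) (r : Int) (fuel : Nat) (m : PySem.Dict (Int × Int) Int),
      r.toNat ≤ n → r.toNat < fuel → GoodMemo tile_length m →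
      (goA tile_length fuel r m).1 = pureF tile_length r ∧
        GoodMemo tile_length (goA tile_length fuel r m).2 := by
  intro n
  induction n with
  | zero =>
    intro r fuel m hn hf hm
    obtain ⟨a, rfl⟩ : ∃ a, fuel = a + 1 := ⟨fuel - 1, by omega⟩
    have hempty : PySem.List.pyRange tile_length (r - tile_length + 1) 1 = [] :=
      PySem.List.pyRange_one_eq_nil (by omega)
    cases hget : PySem.Dict.get? m (tile_length, r) with
    | some v =>
      simp only [goA, hget]
      exact ⟨hm r v hget, hm⟩
    | none =>
      simp only [goA, hget, hempty, List.foldl_nil]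
      refine ⟨(pureF_base tile_length r ht (by omega)).symm, ?_⟩
      exact goodMemo_insert tile_length r m hm (pureF_base tile_length r ht (by omega)).symm
  | succ n ih =>
    intro r fuel m hn hf hm
    obtain ⟨a, rfl⟩ : ∃ a, fuel = a + 1 := ⟨fuel - 1, by omega⟩
    cases hget : PySem.Dict.get? m (tile_length, r) with
    | some v =>
      simp only [goA, hget]
      exact ⟨hm r v hget, hm⟩
    | none =>
      have key : ∀ (l : List Int), (∀ i ∈ l, tile_length ≤ i ∧ i < r - tile_length + 1) →
          ∀ (ans : Int) (m' : PySem.Dict (Int × Int) Int), GoodMemo tile_length m' →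
          (l.foldl
            (fun (st : Int × PySem.Dict (Int × Int) Int) i =>
              (st.1 + (goA tile_length a (r - i) st.2).1,
               (goA tile_length a (r - i) st.2).2)) (ans, m')).1
            = ans + (l.map (fun i => pureF tile_length (r - i))).sum ∧
          GoodMemo tile_length
            (l.foldl
              (fun (st : Int × PySem.Dict (Int × Int) Int) i =>
                (st.1 + (goA tile_length a (r - i) st.2).1,
                 (goA tile_length a (r - i) st.2).2)) (ans, m')).2 := by
        intro l
        induction l with
        | nil => intro _ ans m' hm'; simp [hm']
        | cons i l' ihl =>
          intro hb ans m' hm'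
          obtain ⟨hi, hrest⟩ : (tile_length ≤ i ∧ i < r - tile_length + 1) ∧
              ∀ j ∈ l', tile_length ≤ j ∧ j < r - tile_length + 1 :=
            ⟨hb i (List.mem_cons_self), fun j hj => hb j (List.mem_cons_of_mem _ hj)⟩
          have hq := ih (r - i) a m' (by omega) (by omega) hm'
          simp only [List.foldl_cons]
          rw [hq.1]
          have hrec := ihl hrest (ans + pureF tile_length (r - i))
            (goA tile_length a (r - i) m').2 hq.2
          refine ⟨?_, hrec.2⟩
          rw [hrec.1]
          simp only [List.map_cons, List.sum_cons]
          ring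
      have hk := key (PySem.List.pyRange tile_length (r - tile_length + 1) 1)
        (by intro i hi; exact (PySem.List.mem_pyRange_one).mp hi)
        (r - tile_length + 1) m hm
      simp only [goA, hget]
      refine ⟨?_, ?_⟩
      · show (_ : Int × PySem.Dict (Int × Int) Int).1 = _
        rw [hk.1, ← pureF_rec' tile_length r ht]
      · exact goodMemo_insert tile_length r _ hk.2 (by rw [hk.1, ← pureF_rec' tile_length r ht])

-- the port equals the cache-free recursion
theorem bridge (tile_length row_length : Int) (ht : 1 ≤ tile_length) :
    get_replacements tile_length row_length = pureF tile_length row_length := by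
  have hempty : GoodMemo tile_length PySem.Dict.empty := by
    intro r v h
    simp [PySem.Dict.get?, PySem.Dict.empty] at h
  exact (goA_ok tile_length ht row_length.toNat row_length (row_length.toNat + 1)
    PySem.Dict.empty (le_refl _) (by omega) hempty).1

-- loop invariant of B's single pass
theorem altLoop_inv (tile_length : Int) (ht : 1 ≤ tile_length) :
    ∀ (R : Int), tile_length ≤ R →
      ((PySem.List.pyRange tile_length (R + 1) 1).foldl
        (fun (st : List Int × Int) r =>
          let S := if tile_length ≤ r - tile_length
                   then st.2 + PySem.List.pyGetD st.1 (r - 2 * tile_length) 0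
                   else st.2
          (st.1 ++ [r - tile_length + 1 + S], S))
        ([], 0)) =
      ((PySem.List.pyRange tile_length (R + 1) 1).map (pureF tile_length),
       ((PySem.List.pyRange tile_length (R - tile_length + 1) 1).map
         (pureF tile_length)).sum) := by
  intro R hR
  induction R, hR using Int.le_induction with
  | base =>
    rw [PySem.List.pyRange_one_singleton]
    have h0 : PySem.List.pyRange tile_length (tile_length - tile_length + 1) 1 = [] :=
      PySem.List.pyRange_one_eq_nil (by omega)
    have hf : pureF tile_length tile_length = tile_length - tile_length + 1 := by
      rw [pureF_rec tile_length tile_length ht, h0]; simp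
    simp only [List.foldl_cons, List.foldl_nil, List.map_cons, List.map_nil, h0]
    rw [if_neg (by omega)]
    simp [hf]
  | succ R hR ih =>
    have hsplit : PySem.List.pyRange tile_length (R + 1 + 1) 1
        = PySem.List.pyRange tile_length (R + 1) 1 ++ [R + 1] :=
      PySem.List.pyRange_one_succ_right (by omega)
    rw [hsplit, List.foldl_append, ih, List.map_append]
    simp only [List.foldl_cons, List.foldl_nil, List.map_cons, List.map_nil]
    have hrec := pureF_rec tile_length (R + 1) ht
    by_cases hc : tile_length ≤ R + 1 - tile_length
    · have hsr : PySem.List.pyRange tile_length (R + 1 - tile_length + 1) 1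
          = PySem.List.pyRange tile_length (R - tile_length + 1) 1 ++ [R - tile_length + 1] := by
        have h := PySem.List.pyRange_one_succ_right
          (a := tile_length) (b := R - tile_length + 1) (by omega)
        rw [show R + 1 - tile_length + 1 = R - tile_length + 1 + 1 by ring]
        exact h
      have hcast : R + 1 - 2 * tile_length = (((R + 1 - 2 * tile_length).toNat : Nat) : Int) :=
        (Int.toNat_of_nonneg (by omega)).symm
      have hidx : PySem.List.pyGetD
            ((PySem.List.pyRange tile_length (R + 1) 1).map (pureF tile_length))
            (R + 1 - 2 * tile_length) 0
          = pureF tile_length (R - tile_length + 1) := by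
        rw [hcast, PySem.List.pyGetD_map_pyRange_one _ _ _ _ _ (by omega)]
        congr 1
        omega
      have hS : (if tile_length ≤ R + 1 - tile_length then
            ((PySem.List.pyRange tile_length (R - tile_length + 1) 1).map
              (pureF tile_length)).sum +
              PySem.List.pyGetD
                ((PySem.List.pyRange tile_length (R + 1) 1).map (pureF tile_length))
                (R + 1 - 2 * tile_length) 0
          else ((PySem.List.pyRange tile_length (R - tile_length + 1) 1).map
              (pureF tile_length)).sum)
          = ((PySem.List.pyRange tile_length (R + 1 - tile_length + 1) 1).map
              (pureF tile_length)).sum := by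
        rw [if_pos hc, hidx, hsr]
        simp
      rw [hS]
      have hval : R + 1 - tile_length + 1 +
          ((PySem.List.pyRange tile_length (R + 1 - tile_length + 1) 1).map
            (pureF tile_length)).sum = pureF tile_length (R + 1) := by
        rw [hrec]
      rw [hval]
    · have h1 : PySem.List.pyRange tile_length (R - tile_length + 1) 1 = [] :=
        PySem.List.pyRange_one_eq_nil (by omega)
      have h2 : PySem.List.pyRange tile_length (R + 1 - tile_length + 1) 1 = [] :=
        PySem.List.pyRange_one_eq_nil (by omega)
      have hS : (if tile_length ≤ R + 1 - tile_length then
            ((PySem.List.pyRange tile_length (R - tile_length + 1) 1).map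
              (pureF tile_length)).sum +
              PySem.List.pyGetD
                ((PySem.List.pyRange tile_length (R + 1) 1).map (pureF tile_length))
                (R + 1 - 2 * tile_length) 0
          else ((PySem.List.pyRange tile_length (R - tile_length + 1) 1).map
              (pureF tile_length)).sum)
          = ((PySem.List.pyRange tile_length (R + 1 - tile_length + 1) 1).map
              (pureF tile_length)).sum := by
        rw [if_neg hc, h1, h2]
      rw [hS]
      have hval : R + 1 - tile_length + 1 +
          ((PySem.List.pyRange tile_length (R + 1 - tile_length + 1) 1).map
            (pureF tile_length)).sum = pureF tile_length (R + 1) := by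
        rw [hrec]
      rw [hval]

-- ===== VERDICT (by name: the statement is the Claim_ definition above) =====
theorem get_replacements_spec : Claim_equal_get_replacements := by
  unfold Claim_equal_get_replacements
  intro t r _ hpre
  unfold Spec_get_replacements get_replacements_alt
  by_cases ht : 1 ≤ t
  · rw [bridge t r ht]
    by_cases hr : r < t
    · rw [if_pos hr]
      exact pureF_base t r ht (by omega)
    · rw [if_neg hr]
      have hr' : t ≤ r := by omega
      simp only [altLoop_inv t ht r hr']
      have hcast : r - t = (((r - t).toNat : Nat) : Int) :=
        (Int.toNat_of_nonneg (by omega)).symm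
      rw [hcast, PySem.List.pyGetD_map_pyRange_one _ _ _ _ _ (by omega)]
      have : t + ((r - t).toNat : Int) = r := by omega
      rw [this]
  · have h2 : r < 2 * t := by
      rcases hpre with h | h
      · omega
      · exact h
    rw [if_pos (by omega)]
    have hempty : PySem.List.pyRange t (r - t + 1) 1 = [] :=
      PySem.List.pyRange_one_eq_nil (by omega)
    show (goA t (r.toNat + 1) r PySem.Dict.empty).1 = r - t + 1
    simp [goA, hempty, PySem.Dict.get?, PySem.Dict.empty]
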